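-- pv_equiv track=rewrite | github.com/Amanuel94/CF-Solutions | B_K_th_one.py | query
-- ===== SOURCE A (Python) =====
-- def query(tree,  k):
--     v = 0
--     while v <= len(tree)//2 - 1:
--         if tree[2*v + 1] > k:
--             v = 2*v + 1
--         else:
--             v = 2*v + 2
--             k = k - tree[v-1]
--     return v - (len(tree)//2)
-- ===== SOURCE B (Python) =====
-- def query(tree, k):
--     m = len(tree) // 2
--
--     def go(v, k):
--         if v > m - 1:
--             return v - m
--         left = tree[2 * v + 1]
--         if left > k:
--             return go(2 * v + 1, k)
--         return go(2 * v + 2, k - left)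
--
--     return go(0, k)
-- ===== Notes on version B (the rewrite author's own statement) =====
-- stated objective: alternative
-- what changed: Replaces the iterative while-loop with mutated v/k state by a recursive descent helper over the tree node index that returns the answer directly at the leaf base case.
import Mathlib
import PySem

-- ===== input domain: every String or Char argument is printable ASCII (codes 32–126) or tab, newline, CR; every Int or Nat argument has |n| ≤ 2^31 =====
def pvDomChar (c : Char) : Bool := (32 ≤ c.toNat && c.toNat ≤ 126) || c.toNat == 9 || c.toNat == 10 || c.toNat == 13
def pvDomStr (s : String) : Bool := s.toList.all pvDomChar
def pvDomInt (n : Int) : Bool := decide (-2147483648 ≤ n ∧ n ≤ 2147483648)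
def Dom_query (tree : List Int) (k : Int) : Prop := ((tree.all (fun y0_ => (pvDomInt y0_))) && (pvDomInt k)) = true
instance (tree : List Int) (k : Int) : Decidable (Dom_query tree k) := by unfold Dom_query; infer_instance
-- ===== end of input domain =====

-- B rewrites A's iterative while-loop as a recursive descent helper (alternative decomposition; same cost).

-- ===== PORT A =====
-- the while-loop of A, with fuel; from query's call (v = 0) the fuel tree.length + 1
-- is provably sufficient (v strictly increases each step, loop exits once v > len//2 - 1),
-- so the fuel-exhaustion arm is never reached
def queryLoopA (tree : List Int) : Nat → Int → Int → Int
  | 0, v, _ => v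
  | fuel + 1, v, k =>
    if v ≤ ((tree.length / 2 : Nat) : Int) - 1 then
      if PySem.List.pyGetD tree (2 * v + 1) 0 > k then
        queryLoopA tree fuel (2 * v + 1) k
      else
        -- v = 2*v + 2; k = k - tree[v - 1]
        queryLoopA tree fuel (2 * v + 2) (k - PySem.List.pyGetD tree ((2 * v + 2) - 1) 0)
    else v

def query (tree : List Int) (k : Int) : Int :=
  queryLoopA tree (tree.length + 1) 0 k - ((tree.length / 2 : Nat) : Int)

-- ===== PORT B =====
-- recursive descent over the node index v (Source B's helper go; m = len(tree)//2)
def goB (tree : List Int) (m : Nat) (v : Nat) (k : Int) : Int :=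
  if _h : v + 1 ≤ m then
    let left := PySem.List.pyGetD tree ((2 * v + 1 : Nat) : Int) 0
    if left > k then goB tree m (2 * v + 1) k
    else goB tree m (2 * v + 2) (k - left)
  else (v : Int) - (m : Int)
  termination_by m - v
  decreasing_by
    · omega
    · omega

def query_alt (tree : List Int) (k : Int) : Int :=
  goB tree (tree.length / 2) 0 k

-- ===== PRECONDITION & SPEC =====
def Spec_query (tree : List Int) (k : Int) (out : Int) : Prop := out = query_alt tree k
instance (tree : List Int) (k : Int) (out : Int) : Decidable (Spec_query tree k out) := by unfold Spec_query; infer_instance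

-- ===== CLAIM (what is proved, stated in full; the proofs are below) =====
def Claim_equal_query : Prop := ∀ (tree : List Int) (k : Int), Dom_query tree k → Spec_query tree k (query tree k)

-- ===== LEMMAS AND PROOFS =====

lemma loop_eq_go (tree : List Int) :
    ∀ (fuel : Nat) (v : Nat) (k : Int), tree.length / 2 ≤ fuel + v →
      queryLoopA tree fuel (v : Int) k - ((tree.length / 2 : Nat) : Int)
        = goB tree (tree.length / 2) v k := by
  intro fuel
  induction fuel with
  | zero =>
    intro v k h
    rw [queryLoopA, goB]
    rw [dif_neg (by omega)]
  | succ fuel ih =>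
    intro v k h
    rw [queryLoopA, goB]
    by_cases hv : v + 1 ≤ tree.length / 2
    · rw [if_pos (by push_cast; omega), dif_pos hv]
      have hidx : ((2 * v + 1 : Nat) : Int) = 2 * (v : Int) + 1 := by push_cast; ring
      simp only [hidx]
      by_cases hl : PySem.List.pyGetD tree (2 * (v : Int) + 1) 0 > k
      · rw [if_pos hl, if_pos hl]
        have := ih (2 * v + 1) k (by omega)
        push_cast at this ⊢
        exact this
      · rw [if_neg hl, if_neg hl]
        have h21 : (2 * (v : Int) + 2) - 1 = 2 * (v : Int) + 1 := by ring
        rw [h21]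
        have := ih (2 * v + 2) (k - PySem.List.pyGetD tree (2 * (v : Int) + 1) 0) (by omega)
        push_cast at this ⊢
        exact this
    · rw [if_neg (by push_cast; omega), dif_neg hv]

-- ===== VERDICT (by name: the statement is the Claim_ definition above) =====
theorem query_spec : Claim_equal_query := by
  intro tree k _
  unfold Spec_query query query_alt
  have h := loop_eq_go tree (tree.length + 1) 0 k (by omega)
  simpa using h
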